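-- pv_equiv track=rewrite | github.com/primrose101/CS322 | finite_state_machines/data_types.py | float_lexer
-- ===== SOURCE A (Python) =====
-- def float_lexer(string_input, index):
--     i = index
--     state_table = [[1, 3, 3],
--                    [1, 2, 3],
--                    [2, 3, 3],
--                    [3, 3, 3], ]
--
--     state = 0
--     infut = 0
--     string_length = len(string_input)
--     while i != string_length:
--         if string_input[i].isdigit():
--             infut = 0
--         elif string_input[i] == '.':
--             infut = 1
--         else:
--             infut = 2
--         state = state_table[state][infut]
--         if state == 3:
--             break
--         i += 1
--     return i - index
-- ===== SOURCE B (Python) =====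
-- def float_lexer(string_input, index):
--     # Phase-structured scan: digits, then an optional '.' (only after >=1 digit), then digits.
--     i = index
--     n = len(string_input)
--     start = i
--     while i != n and string_input[i].isdigit():
--         i += 1
--     if i != start and i != n and string_input[i] == '.':
--         i += 1
--         while i != n and string_input[i].isdigit():
--             i += 1
--     return i - index
-- ===== Notes on version B (the rewrite author's own statement) =====
-- stated objective: simpler
-- what changed: Replaced the 4x3 state-transition-table DFA loop with a direct three-phase scan (leading digits, optional dot only after at least one digit, trailing digits).
import Mathlib
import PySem

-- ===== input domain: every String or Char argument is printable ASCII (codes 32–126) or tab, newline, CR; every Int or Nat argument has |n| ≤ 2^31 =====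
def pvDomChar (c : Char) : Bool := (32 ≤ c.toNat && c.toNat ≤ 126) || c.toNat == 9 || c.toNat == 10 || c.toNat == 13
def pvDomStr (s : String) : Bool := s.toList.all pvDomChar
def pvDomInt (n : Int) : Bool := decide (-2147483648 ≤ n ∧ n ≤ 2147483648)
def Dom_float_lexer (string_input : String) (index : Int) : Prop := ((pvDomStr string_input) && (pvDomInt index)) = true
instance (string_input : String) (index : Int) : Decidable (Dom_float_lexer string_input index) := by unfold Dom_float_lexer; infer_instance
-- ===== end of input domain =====

-- B replaces A's transition-table DFA with a direct three-phase scan (digits, optional dot after >=1 digit, digits); objective: simpler.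


-- ===== PORT A =====
-- A's state table: state_table[state][infut]
def pvStateTable : List (List Nat) := [[1, 3, 3], [1, 2, 3], [2, 3, 3], [3, 3, 3]]

-- A's while-loop: i advances until i = len, state 3 breaks; pyGet? = none is where Python raises (excluded by Pre_)
def pvALoop (cs : List Char) (i : Int) (state : Nat) : Int :=
  if i = (cs.length : Int) then i
  else
    match h : PySem.List.pyGet? cs i with
    | none => i
    | some c =>
      let infut : Nat := if PySem.Chars.isdigit c then 0 else if c = '.' then 1 else 2
      let state' : Nat := (pvStateTable.getD state []).getD infut 3
      if state' = 3 then i else pvALoop cs (i + 1) state'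
termination_by (cs.length - i).toNat
decreasing_by
  have hr : PySem.Raise.InRange cs.length i := by
    by_contra hc
    rw [← PySem.List.pyGet?_eq_none_iff (xs := cs)] at hc
    simp [h] at hc
  unfold PySem.Raise.InRange at hr
  omega

def float_lexer (string_input : String) (index : Int) : Int :=
  pvALoop string_input.toList index 0 - index

-- ===== PORT B =====
-- B's digit-consuming while-loop (used twice in Source B)
def pvDigits (cs : List Char) (i : Int) : Int :=
  if i = (cs.length : Int) then i
  else
    match h : PySem.List.pyGet? cs i with
    | none => i
    | some c => if PySem.Chars.isdigit c then pvDigits cs (i + 1) else i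
termination_by (cs.length - i).toNat
decreasing_by
  have hr : PySem.Raise.InRange cs.length i := by
    by_contra hc
    rw [← PySem.List.pyGet?_eq_none_iff (xs := cs)] at hc
    simp [h] at hc
  unfold PySem.Raise.InRange at hr
  omega

def float_lexer_alt (string_input : String) (index : Int) : Int :=
  let cs := string_input.toList
  let j := pvDigits cs index
  let j' :=
    if j ≠ index ∧ j ≠ (cs.length : Int) ∧ PySem.List.pyGet? cs j = some '.' then
      pvDigits cs (j + 1)
    else j
  j' - index

-- ===== PRECONDITION & SPEC =====
-- Pre_ excludes exactly the inputs where A raises IndexError: index past the end or before -len.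
def Pre_float_lexer (string_input : String) (index : Int) : Prop :=
  -(string_input.toList.length : Int) ≤ index ∧ index ≤ (string_input.toList.length : Int)
instance (string_input : String) (index : Int) : Decidable (Pre_float_lexer string_input index) := by
  unfold Pre_float_lexer; infer_instance
def pvWitness_float_lexer : String × Int := ("3.14x", 0)

def Spec_float_lexer (string_input : String) (index : Int) (out : Int) : Prop := out = float_lexer_alt string_input index
instance (string_input : String) (index : Int) (out : Int) : Decidable (Spec_float_lexer string_input index out) := by unfold Spec_float_lexer; infer_instance

-- ===== CLAIM (what is proved, stated in full; the proofs are below) =====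
def Claim_equal_float_lexer : Prop := ∀ (string_input : String) (index : Int), Dom_float_lexer string_input index → Pre_float_lexer string_input index → Spec_float_lexer string_input index (float_lexer string_input index)

-- ===== LEMMAS AND PROOFS =====

-- one-step unfolding lemmas (the `match h : _` form in the ports is opaque to simp, so we expose the three cases)
theorem pvDigits_end (cs : List Char) (i : Int) (h : i = (cs.length : Int)) :
    pvDigits cs i = i := by rw [pvDigits]; simp [h]

theorem pvDigits_none (cs : List Char) (i : Int) (h : i ≠ (cs.length : Int))
    (hg : PySem.List.pyGet? cs i = none) : pvDigits cs i = i := by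
  rw [pvDigits]; rw [if_neg h]; split <;> simp_all

theorem pvDigits_digit (cs : List Char) (i : Int) (c : Char) (h : i ≠ (cs.length : Int))
    (hg : PySem.List.pyGet? cs i = some c) (hd : PySem.Chars.isdigit c = true) :
    pvDigits cs i = pvDigits cs (i + 1) := by
  rw [pvDigits]; rw [if_neg h]; split <;> simp_all

theorem pvDigits_stop (cs : List Char) (i : Int) (c : Char) (h : i ≠ (cs.length : Int))
    (hg : PySem.List.pyGet? cs i = some c) (hd : ¬ PySem.Chars.isdigit c = true) :
    pvDigits cs i = i := by
  rw [pvDigits]; rw [if_neg h]; split <;> simp_all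

theorem pvALoop_end (cs : List Char) (i : Int) (st : Nat) (h : i = (cs.length : Int)) :
    pvALoop cs i st = i := by rw [pvALoop]; simp [h]

theorem pvALoop_none (cs : List Char) (i : Int) (st : Nat) (h : i ≠ (cs.length : Int))
    (hg : PySem.List.pyGet? cs i = none) : pvALoop cs i st = i := by
  rw [pvALoop]; rw [if_neg h]; split <;> simp_all

theorem pvALoop_some (cs : List Char) (i : Int) (st : Nat) (c : Char)
    (h : i ≠ (cs.length : Int)) (hg : PySem.List.pyGet? cs i = some c) :
    pvALoop cs i st =
      (if (pvStateTable.getD st []).getD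
            (if PySem.Chars.isdigit c then 0 else if c = '.' then 1 else 2) 3 = 3 then i
       else pvALoop cs (i + 1)
            ((pvStateTable.getD st []).getD
              (if PySem.Chars.isdigit c then 0 else if c = '.' then 1 else 2) 3)) := by
  rw [pvALoop]; rw [if_neg h]; split <;> simp_all

-- the digit loop never moves backwards
theorem pvDigits_ge (cs : List Char) (i : Int) : i ≤ pvDigits cs i := by
  fun_induction pvDigits cs i with
  | case1 => omega
  | case2 i hne hg => omega
  | case3 i hne c hg hd ih => omega
  | case4 i hne c hg hd => omega

-- A's loop in state 2 is exactly B's digit loop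
theorem pvALoop_state2 (cs : List Char) (i : Int) : pvALoop cs i 2 = pvDigits cs i := by
  fun_induction pvDigits cs i with
  | case1 => exact pvALoop_end cs _ 2 rfl
  | case2 i hne hg => exact pvALoop_none cs i 2 hne hg
  | case3 i hne c hg hd ih =>
    rw [pvALoop_some cs i 2 c hne hg]
    simp [pvStateTable, hd, ih]
  | case4 i hne c hg hd =>
    rw [pvALoop_some cs i 2 c hne hg]
    simp only [hd, Bool.false_eq_true, if_false]
    by_cases hc : c = '.'
    · rw [if_pos hc, if_pos (by decide)]
    · rw [if_neg hc, if_pos (by decide)]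

-- A's loop in state 1 = B's digit loop followed by B's dot branch
theorem pvALoop_state1 (cs : List Char) (i : Int) :
    pvALoop cs i 1 =
      (if pvDigits cs i ≠ (cs.length : Int) ∧
          PySem.List.pyGet? cs (pvDigits cs i) = some '.' then
        pvDigits cs (pvDigits cs i + 1)
      else pvDigits cs i) := by
  fun_induction pvDigits cs i with
  | case1 =>
    rw [pvALoop_end cs _ 1 rfl, if_neg (by simp)]
  | case2 i hne hg =>
    rw [pvALoop_none cs i 1 hne hg, if_neg (by simp [hg])]
  | case3 i hne c hg hd ih =>
    rw [pvALoop_some cs i 1 c hne hg]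
    simp only [hd, if_true]
    have h1 : (pvStateTable.getD 1 []).getD 0 3 = 1 := by decide
    rw [h1, if_neg (by decide)]
    exact ih
  | case4 i hne c hg hd =>
    rw [pvALoop_some cs i 1 c hne hg]
    simp only [hd, Bool.false_eq_true, if_false]
    by_cases hc : c = '.'
    · rw [if_pos hc]
      have h2 : (pvStateTable.getD 1 []).getD 1 3 = 2 := by decide
      rw [h2, if_neg (by decide), pvALoop_state2,
        if_pos ⟨hne, by rw [hg, hc]⟩]
    · rw [if_neg hc, if_pos (by decide), if_neg]
      rintro ⟨-, h2⟩
      rw [hg] at h2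
      exact hc (by injection h2)

-- the two ports agree on every input (even where Python would raise, both ports return the same value)
theorem pvPorts_eq (string_input : String) (index : Int) :
    float_lexer string_input index = float_lexer_alt string_input index := by
  unfold float_lexer float_lexer_alt
  dsimp only
  congr 1
  by_cases h : index = (string_input.toList.length : Int)
  · rw [pvALoop_end _ _ 0 h, pvDigits_end _ _ h]
    simp
  · rcases hg : PySem.List.pyGet? string_input.toList index with _ | c
    · rw [pvALoop_none _ _ 0 h hg, pvDigits_none _ _ h hg]
      simp
    · by_cases hd : PySem.Chars.isdigit c = true
      · -- first char is a digit: A moves to state 1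
        have hstep := pvDigits_digit _ _ c h hg hd
        have hge : index + 1 ≤ pvDigits string_input.toList (index + 1) :=
          pvDigits_ge string_input.toList (index + 1)
        have hne : pvDigits string_input.toList index ≠ index := by omega
        rw [pvALoop_some _ _ 0 c h hg]
        simp only [hd, if_true]
        have h0 : (pvStateTable.getD 0 []).getD 0 3 = 1 := by decide
        rw [h0, if_neg (by decide)]
        rw [pvALoop_state1, ← hstep]
        by_cases hcond : pvDigits string_input.toList index ≠ (string_input.toList.length : Int) ∧
            PySem.List.pyGet? string_input.toList (pvDigits string_input.toList index) = some '.'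
        · rw [if_pos hcond, if_pos ⟨hne, hcond.1, hcond.2⟩]
        · rw [if_neg hcond, if_neg (fun hk => hcond ⟨hk.2.1, hk.2.2⟩)]
      · -- first char is not a digit: A halts at state 3, B consumes nothing
        have hDi := pvDigits_stop _ _ c h hg hd
        rw [pvALoop_some _ _ 0 c h hg]
        simp only [hd, Bool.false_eq_true, if_false]
        by_cases hc : c = '.'
        · rw [if_pos hc, if_pos (by decide), hDi, if_neg (by simp)]
        · rw [if_neg hc, if_pos (by decide), hDi, if_neg (by simp)]

-- ===== VERDICT (by name: the statement is the Claim_ definition above) =====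
theorem float_lexer_spec : Claim_equal_float_lexer := by
  intro string_input index _ _
  unfold Spec_float_lexer
  exact pvPorts_eq string_input index
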